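-- pv_equiv track=rewrite | github.com/OCA/partner-contact | partner_helper/models/partner.py | split_char
-- ===== SOURCE A (Python) =====
-- def split_char(char, output_number, size):
--     words = char.split(' ')
--     result = []
--     word = words.pop(0)
--     for index in range(0, output_number):
--         result.append(word)
--         word = ''
--         while len(words) > 0:
--             word = words.pop(0)
--             if len(result[index] + ' %s' % word) > size:
--                 break
--             else:
--                 result[index] += ' %s' % word
--                 word = ''
--     return result
-- ===== SOURCE B (Python) =====
-- def split_char(char, output_number, size):
--     words = char.split(' ')
--     lines = []
--     cur = words[0]
--     for w in words[1:]:
--         if len(cur) + 1 + len(w) > size: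
--             lines.append(cur)
--             cur = w
--         else:
--             cur += ' ' + w
--     lines.append(cur)
--     n = max(output_number, 0)
--     return (lines + [''] * n)[:n]
-- ===== Notes on version B (the rewrite author's own statement) =====
-- stated objective: alternative
-- what changed: Replaces A's slot-outer loop with destructive pop(0) inner scans by a single forward pass over the word list that greedily wraps all words into lines, then takes the first output_number lines padded with empty strings.
import Mathlib
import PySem

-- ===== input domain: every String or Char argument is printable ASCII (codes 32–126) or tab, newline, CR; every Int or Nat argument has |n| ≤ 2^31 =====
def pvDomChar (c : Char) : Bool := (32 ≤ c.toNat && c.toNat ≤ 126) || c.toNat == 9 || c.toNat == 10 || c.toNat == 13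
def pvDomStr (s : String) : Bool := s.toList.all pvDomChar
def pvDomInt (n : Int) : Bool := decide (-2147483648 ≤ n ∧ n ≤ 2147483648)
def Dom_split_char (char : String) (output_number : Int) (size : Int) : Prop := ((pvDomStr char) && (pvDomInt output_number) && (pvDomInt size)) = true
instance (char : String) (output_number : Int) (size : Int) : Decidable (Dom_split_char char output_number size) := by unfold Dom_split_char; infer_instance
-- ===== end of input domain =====

-- B replaces A's slot-outer/pop-inner decomposition by one greedy forward pass over the
-- words followed by take/pad; same return value everywhere (alternative decomposition).
-- Ports work on List Char (PySem.Chars.splitOn; Python len/+ are List.length/++ there).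

-- ===== PORT A =====
-- inner 'while len(words) > 0: word = words.pop(0); if len(result[index] + ' %s' % word) > size: break else: result[index] += ' %s' % word; word = '''
-- returns (final line for this slot, carried word, remaining words)
def splitInnerA (size : Int) (line : List Char) : List (List Char) → List Char × List Char × List (List Char)
  | [] => (line, [], [])
  | w :: rest =>
    if ((line ++ ' ' :: w).length : Int) > size then (line, w, rest)
    else splitInnerA size (line ++ ' ' :: w) rest

-- 'for index in range(0, output_number): result.append(word); word = ''; <inner loop>'
def splitOuterA (size : Int) : Nat → List (List Char) → List Char → List (List Char) → List (List Char)
  | 0, result, _, _ => result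
  | n + 1, result, word, words =>
    match splitInnerA size word words with
    | (line, word', words') => splitOuterA size n (result ++ [line]) word' words'

def split_char (char : String) (output_number : Int) (size : Int) : List String :=
  match PySem.Chars.splitOn char.toList [' '] with   -- char.split(' ')
  | [] => []   -- unreachable: split(' ') always returns a non-empty list, so pop(0) never raises
  | w :: ws => (splitOuterA size output_number.toNat [] w ws).map String.mk
        -- range(0, output_number) is empty for output_number ≤ 0: toNat = max(output_number, 0)

-- ===== PORT B =====
-- 'for w in words[1:]: if len(cur) + 1 + len(w) > size: lines.append(cur); cur = w else: cur += ' ' + w' then 'lines.append(cur)'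
def wrapLinesB (size : Int) (lines : List (List Char)) (cur : List Char) : List (List Char) → List (List Char)
  | [] => lines ++ [cur]
  | w :: rest =>
    if (cur.length : Int) + 1 + (w.length : Int) > size then wrapLinesB size (lines ++ [cur]) w rest
    else wrapLinesB size lines (cur ++ ' ' :: w) rest

def split_char_alt (char : String) (output_number : Int) (size : Int) : List String :=
  match PySem.Chars.splitOn char.toList [' '] with   -- char.split(' ')
  | [] => []   -- unreachable (split(' ') is never empty; words[0] never raises)
  | first :: rest =>
    let n := output_number.toNat   -- n = max(output_number, 0)
    (((wrapLinesB size [] first rest) ++ List.replicate n []).take n).map String.mk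
        -- (lines + [''] * n)[:n] with 0 ≤ n: slice-to-n = take n

-- ===== PRECONDITION & SPEC =====
def Spec_split_char (char : String) (output_number : Int) (size : Int) (out : List String) : Prop := out = split_char_alt char output_number size
instance (char : String) (output_number : Int) (size : Int) (out : List String) : Decidable (Spec_split_char char output_number size out) := by unfold Spec_split_char; infer_instance

-- ===== CLAIM (what is proved, stated in full; the proofs are below) =====
def Claim_equal_split_char : Prop := ∀ (char : String) (output_number : Int) (size : Int), Dom_split_char char output_number size → Spec_split_char char output_number size (split_char char output_number size)

-- ===== LEMMAS AND PROOFS =====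

theorem wrapLinesB_acc (size : Int) (lines cur : _) (ws : List (List Char)) :
    wrapLinesB size lines cur ws = lines ++ wrapLinesB size [] cur ws := by
  induction ws generalizing lines cur with
  | nil => simp [wrapLinesB]
  | cons w rest ih =>
    simp only [wrapLinesB]
    split_ifs with h
    · rw [ih (lines ++ [cur]) w, ih ([] ++ [cur]) w]; simp
    · exact ih lines (cur ++ ' ' :: w)

-- the inner while-loop either exhausts the words (no carry) or breaks at the first
-- overflowing word, which then starts the next greedy line of B
theorem splitInnerA_cases (size : Int) (ws : List (List Char)) (cur : List Char) :
    ((splitInnerA size cur ws).2.1 = [] ∧ (splitInnerA size cur ws).2.2 = [] ∧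
      wrapLinesB size [] cur ws = [(splitInnerA size cur ws).1]) ∨
    (wrapLinesB size [] cur ws
      = (splitInnerA size cur ws).1 :: wrapLinesB size [] (splitInnerA size cur ws).2.1 (splitInnerA size cur ws).2.2) := by
  induction ws generalizing cur with
  | nil => left; simp [splitInnerA, wrapLinesB]
  | cons w rest ih =>
    have hcond : (((cur ++ ' ' :: w).length : Int) > size) ↔ ((cur.length : Int) + 1 + (w.length : Int) > size) := by
      simp [List.length_append]; omega
    by_cases h : ((cur ++ ' ' :: w).length : Int) > size
    · right
      simp only [splitInnerA, wrapLinesB, if_pos h, if_pos (hcond.mp h)]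
      rw [wrapLinesB_acc size ([] ++ [cur]) w rest]
      simp
    · have h' := ih (cur ++ ' ' :: w)
      simp only [splitInnerA, wrapLinesB, if_neg h, if_neg (fun hc => h (hcond.mpr hc))]
      exact h'

theorem splitOuterA_empty (size : Int) (n : Nat) (res : List (List Char)) :
    splitOuterA size n res [] [] = res ++ List.replicate n [] := by
  induction n generalizing res with
  | zero => simp [splitOuterA]
  | succ m ih =>
    simp only [splitOuterA, splitInnerA]
    rw [ih (res ++ [[]])]
    simp [List.replicate_succ]

theorem take_append_replicate_stable {α : Type} (x : α) (T : List α) :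
    ∀ n m, n ≤ m → (T ++ List.replicate m x).take n = (T ++ List.replicate n x).take n := by
  induction T with
  | nil =>
    intro n m h
    simp only [List.nil_append, List.take_replicate]
    congr 1
    omega
  | cons a T ih =>
    intro n m h
    cases n with
    | zero => simp
    | succ k =>
      simp only [List.cons_append, List.take_succ_cons]
      rw [ih k m (by omega), ih k (k + 1) (by omega)]

-- A's outer slot loop produces exactly the first n greedy lines, padded with empty lines
theorem splitOuterA_eq_wrap (size : Int) (n : Nat) (res : List (List Char))
    (word : List Char) (ws : List (List Char)) :
    splitOuterA size n res word ws
      = res ++ ((wrapLinesB size [] word ws) ++ List.replicate n []).take n := by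
  induction n generalizing res word ws with
  | zero => simp [splitOuterA]
  | succ m ih =>
    rcases hI : splitInnerA size word ws with ⟨line, carry, rest'⟩
    have hstep : splitOuterA size (m + 1) res word ws
        = splitOuterA size m (res ++ [line]) carry rest' := by
      simp only [splitOuterA, hI]
    rcases splitInnerA_cases size ws word with ⟨hc, hr, hW⟩ | hW <;> rw [hI] at *
    · simp only at hc hr hW
      subst hc; subst hr
      rw [hstep, splitOuterA_empty, hW]
      simp only [List.cons_append, List.nil_append, List.take_succ_cons, List.append_assoc]
      rw [List.take_replicate, Nat.min_eq_left (Nat.le_succ m)]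
    · simp only at hW
      rw [hstep, ih]
      rw [hW]
      simp only [List.cons_append, List.take_succ_cons]
      rw [take_append_replicate_stable ([] : List Char) _ m (m + 1) (Nat.le_succ m)]
      simp

-- ===== VERDICT (by name: the statement is the Claim_ definition above) =====
theorem split_char_spec : Claim_equal_split_char := by
  intro char output_number size _
  cases h : PySem.Chars.splitOn char.toList [' '] with
  | nil => simp [Spec_split_char, split_char, split_char_alt, h]
  | cons w ws => simp [Spec_split_char, split_char, split_char_alt, h, splitOuterA_eq_wrap]
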